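-- pv_equiv track=rewrite | github.com/whh8sllv/SROM-labs-1-2 | srom1.py | longMuolOneDigit
-- ===== SOURCE A (Python) =====
-- def longMuolOneDigit(num1, const):
--     carry = 0
--     res = [0] * (len(num1) + 1)
--     for i in range(len(num1)):
--         temp = num1[i] * const + carry
--         res[i] = temp & (2**32 - 1)
--         carry = temp >> 32
--     res[len(num1)] = carry
--     return res
-- ===== SOURCE B (Python) =====
-- def longMuolOneDigit(num1, const):
--     # One big multiply instead of a per-limb carry loop:
--     # pack the limbs into a single integer, multiply once, slice back into limbs.
--     value = 0
--     for i, limb in enumerate(num1):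
--         value += limb << (32 * i)
--     p = value * const
--     n = len(num1)
--     res = [(p >> (32 * i)) & 0xFFFFFFFF for i in range(n)]
--     res.append(p >> (32 * n))
--     return res
-- ===== Notes on version B (the rewrite author's own statement) =====
-- stated objective: alternative
-- what changed: Replaces the per-limb multiply-with-carry loop by packing the limbs into one big Python integer, doing a single multiplication, and slicing the product back into 32-bit limbs (top limb unmasked).
import Mathlib
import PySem

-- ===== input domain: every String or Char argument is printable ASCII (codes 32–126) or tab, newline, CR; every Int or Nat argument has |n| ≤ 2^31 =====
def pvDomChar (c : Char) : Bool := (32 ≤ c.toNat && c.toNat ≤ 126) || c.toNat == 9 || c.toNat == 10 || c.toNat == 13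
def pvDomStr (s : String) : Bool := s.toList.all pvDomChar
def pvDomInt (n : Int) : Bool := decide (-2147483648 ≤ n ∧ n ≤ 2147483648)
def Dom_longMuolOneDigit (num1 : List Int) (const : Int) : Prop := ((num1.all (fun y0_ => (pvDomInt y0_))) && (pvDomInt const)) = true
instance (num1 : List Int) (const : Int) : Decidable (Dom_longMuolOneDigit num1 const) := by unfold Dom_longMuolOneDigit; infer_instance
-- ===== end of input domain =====

-- B packs the limbs into one big integer, multiplies once, and slices the product back into
-- 32-bit limbs (top limb unmasked), instead of A's per-limb multiply-with-carry loop.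
-- Both return values agree on all inputs; A is total, so there is no Pre_.

-- ===== PORT A =====
-- Python '&' is PySem.Int.band; 'temp >> 32' is core Int '>>>' (floor shift, Python-exact).
def longMuolOneDigit (num1 : List Int) (const : Int) : List Int :=
  let n : Int := PySem.List.len num1
  -- res = [0] * (len(num1) + 1)
  let res0 : List Int := List.replicate (n.toNat + 1) 0
  -- for i in range(len(num1)): …  (state = (res, carry))
  let s := (PySem.List.pyRange 0 n 1).foldl
    (fun (s : List Int × Int) (i : Int) =>
      -- temp = num1[i] * const + carry   (written out at both uses)
      (PySem.List.pySetD s.1 i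
         (PySem.Int.band (PySem.List.pyGetD num1 i 0 * const + s.2) 4294967295),
       (PySem.List.pyGetD num1 i 0 * const + s.2) >>> (32:Nat)))
    (res0, 0)
  -- res[len(num1)] = carry
  PySem.List.pySetD s.1 n s.2

-- ===== PORT B =====
-- value = 0; for i, limb in enumerate(num1): value += limb << (32*i)
-- Python '<<' / '>>' are core Int '<<<' / '>>>' (shift count 32*i with i ≥ 0 from enumerate/range,
-- so the Nat cast of the index is exact); '& 0xFFFFFFFF' is PySem.Int.band.
def longMuolOneDigit_alt (num1 : List Int) (const : Int) : List Int :=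
  let value : Int := (PySem.List.enumerate num1 0).foldl
    (fun (a : Int) (p : Int × Int) => a + p.2 <<< ((32 * p.1.toNat : Nat))) 0
  let p : Int := value * const
  let n : Int := PySem.List.len num1
  let res : List Int := (PySem.List.pyRange 0 n 1).map
    (fun i => PySem.Int.band (p >>> ((32 * i.toNat : Nat))) 4294967295)
  res ++ [p >>> ((32 * n.toNat : Nat))]

-- ===== PRECONDITION & SPEC =====
def Spec_longMuolOneDigit (num1 : List Int) (const : Int) (out : List Int) : Prop := out = longMuolOneDigit_alt num1 const
instance (num1 : List Int) (const : Int) (out : List Int) : Decidable (Spec_longMuolOneDigit num1 const out) := by unfold Spec_longMuolOneDigit; infer_instance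

-- ===== CLAIM (what is proved, stated in full; the proofs are below) =====
def Claim_equal_longMuolOneDigit : Prop := ∀ (num1 : List Int) (const : Int), Dom_longMuolOneDigit num1 const → Spec_longMuolOneDigit num1 const (longMuolOneDigit num1 const)

-- ===== LEMMAS AND PROOFS =====

-- A's carry loop, as a structural recursion: limbs produced so far and the final carry.
def goLimbs (const : Int) : List Int → Int → List Int × Int
  | [], c => ([], c)
  | x :: xs, c =>
      let t := x * const + c
      let r := goLimbs const xs (t >>> (32:Nat))
      (PySem.Int.band t 4294967295 :: r.1, r.2)

-- Base-2^32 decomposition of an integer into n limbs plus an unmasked top limb.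
def bigList : Nat → Int → List Int
  | 0, P => [P]
  | n + 1, P => (P % 4294967296) :: bigList n (P / 4294967296)

-- value of a limb list
def valL : List Int → Int
  | [] => 0
  | x :: xs => x + 4294967296 * valL xs

theorem and_mask_nat (m : Nat) : m &&& 4294967295 = m % 4294967296 := by
  have h := Nat.and_two_pow_sub_one_eq_mod m 32
  norm_num at h
  exact h

theorem band_mask (t : Int) : PySem.Int.band t 4294967295 = t % 4294967296 := by
  unfold PySem.Int.band
  split_ifs with h1 h2 h2
  · rw [show ((4294967295:Int)).toNat = 4294967295 from rfl, and_mask_nat]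
    omega
  · omega
  · rw [show ((4294967295:Int)).toNat = 4294967295 from rfl, Nat.land_comm, and_mask_nat]
    omega
  · omega

theorem shift32 (t : Int) : t >>> (32 : Nat) = t / 4294967296 := by
  have := Int.shiftRight_eq_div_pow t 32
  norm_num at this; exact this

theorem goLimbs_length (const : Int) (xs : List Int) (c : Int) :
    (goLimbs const xs c).1.length = xs.length := by
  induction xs generalizing c with
  | nil => rfl
  | cons x xs ih => simp [goLimbs, ih]

-- the bridge: A's carry loop computes exactly the base-2^32 decomposition
theorem goLimbs_eq_bigList (const : Int) (xs : List Int) (c : Int) :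
    (goLimbs const xs c).1 ++ [(goLimbs const xs c).2]
      = bigList xs.length (valL xs * const + c) := by
  induction xs generalizing c with
  | nil => simp [goLimbs, bigList, valL]
  | cons x xs ih =>
      simp only [goLimbs, bigList, valL, List.length_cons, List.cons_append]
      congr 1
      · rw [band_mask]
        have : (x + 4294967296 * valL xs) * const + c
            = (x * const + c) + 4294967296 * (valL xs * const) := by ring
        rw [this, Int.add_mul_emod_self_left]
      · rw [ih, shift32]
        congr 1
        have h1 : (x + 4294967296 * valL xs) * const + c
            = (x * const + c) + (valL xs * const) * 4294967296 := by ring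
        rw [h1, Int.add_mul_ediv_right _ _ (by norm_num : (4294967296:Int) ≠ 0)]
        ring

theorem set_len_append (L : List Int) (y v : Int) (ys : List Int) :
    (L ++ y :: ys).set L.length v = L ++ v :: ys := by
  induction L with
  | nil => rfl
  | cons a L ih => simp [ih]

-- the A-side loop characterisation
theorem foldA (num1 : List Int) (const : Int) :
    ∀ (k a : Nat) (L : List Int) (c : Int), L.length = a → a + k = num1.length →
    (PySem.List.pyRange (a : Int) (num1.length : Int) 1).foldl
      (fun (s : List Int × Int) (i : Int) =>
        (PySem.List.pySetD s.1 i
           (PySem.Int.band (PySem.List.pyGetD num1 i 0 * const + s.2) 4294967295),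
         (PySem.List.pyGetD num1 i 0 * const + s.2) >>> (32:Nat)))
      (L ++ List.replicate (k + 1) 0, c)
    = (L ++ (goLimbs const (num1.drop a) c).1 ++ [0], (goLimbs const (num1.drop a) c).2) := by
  intro k
  induction k with
  | zero =>
      intro a L c hL ha
      have hdrop : num1.drop a = [] := by
        apply List.drop_eq_nil_of_le; omega
      rw [PySem.List.pyRange_one_eq_nil (by omega)]
      simp [hdrop, goLimbs]
  | succ k ih =>
      intro a L c hL ha
      have hlt : a < num1.length := by omega
      obtain ⟨x, hx⟩ : ∃ x, num1.drop a = x :: num1.drop (a + 1) := by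
        refine ⟨num1[a], ?_⟩
        rw [List.drop_eq_getElem_cons hlt]
      have hget : PySem.List.pyGetD num1 (a : Int) 0 = x := by
        rw [PySem.List.pyGetD_natCast]
        have hxa : num1[a] = x := by
          have h2 := hx; rw [List.drop_eq_getElem_cons hlt] at h2
          exact (List.cons.injEq _ _ _ _ ▸ h2).1
        rw [List.getD_eq_getElem _ _ hlt, hxa]
      rw [PySem.List.pyRange_one_cons (by exact_mod_cast hlt)]
      simp only [List.foldl_cons]
      have hset : PySem.List.pySetD (L ++ List.replicate (k + 1 + 1) 0) (a : Int)
          (PySem.Int.band (x * const + c) 4294967295)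
          = (L ++ [PySem.Int.band (x * const + c) 4294967295]) ++ List.replicate (k + 1) 0 := by
        rw [PySem.List.pySetD_natCast]
        have hr : List.replicate (k + 1 + 1) (0:Int) = 0 :: List.replicate (k + 1) 0 := rfl
        rw [hr, ← hL, set_len_append]
        simp
      rw [hget, hset]
      have hcast : (a : Int) + 1 = ((a + 1 : Nat) : Int) := by push_cast; ring
      rw [hcast, ih (a + 1) (L ++ [PySem.Int.band (x * const + c) 4294967295])
            ((x * const + c) >>> (32:Nat)) (by simp [hL]) (by omega)]
      rw [hx]
      simp [goLimbs]

-- A equals the decomposition of value * const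
theorem A_eq_bigList (num1 : List Int) (const : Int) :
    longMuolOneDigit num1 const = bigList num1.length (valL num1 * const) := by
  unfold longMuolOneDigit
  simp only [PySem.List.len_eq]
  have h := foldA num1 const num1.length 0 [] 0 rfl (by omega)
  simp only [Int.natCast_zero, List.nil_append, List.drop_zero, Int.toNat_natCast] at h ⊢
  rw [h]
  dsimp only
  rw [PySem.List.pySetD_natCast]
  have hlen : (goLimbs const num1 0).1.length = num1.length := goLimbs_length const num1 0
  have hsl := set_len_append (goLimbs const num1 0).1 0 (goLimbs const num1 0).2 []
  rw [hlen] at hsl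
  rw [hsl]
  have := goLimbs_eq_bigList const num1 0
  simpa using this

-- B-side: the packing fold computes valL (times the power of 2 at the start index)
theorem fold_value (xs : List Int) : ∀ (s : Nat) (acc : Int),
    (PySem.List.enumerate xs (s : Int)).foldl
      (fun (a : Int) (p : Int × Int) => a + p.2 <<< (32 * p.1.toNat)) acc
    = acc + 2 ^ (32 * s) * valL xs := by
  induction xs with
  | nil => intro s acc; simp [PySem.List.enumerate_nil, valL]
  | cons x xs ih =>
      intro s acc
      rw [PySem.List.enumerate_cons]
      simp only [List.foldl_cons]
      have hc : (s : Int) + 1 = ((s + 1 : Nat) : Int) := by push_cast; ring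
      rw [hc, ih (s + 1)]
      simp only [Int.toNat_natCast, Int.shiftLeft_eq, valL]
      have : (2:Int) ^ (32 * (s + 1)) = 2 ^ (32 * s) * 4294967296 := by
        rw [Nat.mul_add, pow_add]; norm_num
      rw [this]; ring

-- the slicing comprehension equals bigList
theorem map_decomp : ∀ (n : Nat) (P : Int),
    (List.range n).map (fun k => (P / 4294967296 ^ k) % 4294967296) ++ [P / 4294967296 ^ n]
      = bigList n P := by
  intro n
  induction n with
  | zero => intro P; simp [bigList]
  | succ n ih =>
      intro P
      rw [List.range_succ_eq_map]
      simp only [List.map_cons, List.map_map, bigList, pow_zero, Int.ediv_one,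
        List.cons_append]
      congr 1
      rw [← ih (P / 4294967296)]
      congr 1
      · apply List.map_congr_left
        intro k _
        simp only [Function.comp_apply]
        rw [pow_succ', ← Int.ediv_ediv_of_nonneg (by norm_num)]
      · rw [pow_succ', ← Int.ediv_ediv_of_nonneg (by norm_num)]

theorem B_eq_bigList (num1 : List Int) (const : Int) :
    longMuolOneDigit_alt num1 const = bigList num1.length (valL num1 * const) := by
  unfold longMuolOneDigit_alt
  simp only [PySem.List.len_eq]
  have hv := fold_value num1 0 0
  simp only [Nat.cast_zero, Nat.mul_zero, pow_zero, one_mul, zero_add] at hv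
  rw [hv]
  rw [← map_decomp num1.length (valL num1 * const)]
  congr 1
  · rw [PySem.List.pyRange_one]
    simp only [Int.sub_zero, Int.toNat_natCast, List.map_map]
    apply List.map_congr_left
    intro k hk
    simp only [Function.comp_apply, Int.zero_add, Int.toNat_natCast]
    rw [band_mask]
    congr 1
    rw [Int.shiftRight_eq_div_pow]
    congr 1
    rw [Nat.pow_mul]
    norm_num
  · rw [Int.toNat_natCast, Int.shiftRight_eq_div_pow]
    congr 1
    rw [Nat.pow_mul]
    norm_num

-- ===== VERDICT (by name: the statement is the Claim_ definition above) =====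
theorem longMuolOneDigit_spec : Claim_equal_longMuolOneDigit := by
  intro num1 const _
  unfold Spec_longMuolOneDigit
  rw [A_eq_bigList, B_eq_bigList]
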